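-- pv_equiv track=rewrite | github.com/justayak/alp2 | julian/aufgabe4_6.py | miniSubsetSumAlt
-- ===== SOURCE A (Python) =====
-- def miniSubsetSumAlt(list):
-- 	list = sorted(list)  #Timsort:  				O(n*log(n))
-- 	median = sum(list) // len(list)  #				O(n)
-- 	#
-- 	print (median)
-- 	i =  0 if median >= 0 else len(list)-1
-- 	acc = 1 if median >= 0 else -1
-- 	end =  len(list)-1 if median >= 0 else len(list)-1
-- 	result = []
-- 	while i < end if median >= 0 else i > end:
-- 		print (i)
-- 		j = i + acc
-- 		while j < end if median >= 0 else j > end: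
-- 			current = list[i] + list[j]
-- 			if current == median:
-- 				result.append((list[i], list[j]))
-- 				break
-- 			if current >  median:
-- 				break
-- 			j = j + acc
-- 		i = i + acc
-- 	return result
-- ===== SOURCE B (Python) =====
-- def miniSubsetSumAlt(list):
--     s = sorted(list)
--     n = len(s)
--     median = sum(s) // n
--     print(median)
--     result = []
--     if median < 0:
--         return result
--     # multiset of the candidate partners s[1..n-2] (A's inner scan never reaches the last element)
--     counts = {}
--     for x in s[1:n - 1]:
--         counts[x] = counts.get(x, 0) + 1
--     for i in range(n - 1):
--         t = median - s[i]
--         if counts.get(t, 0) > 0: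
--             result.append((s[i], t))
--         if i + 1 < n - 1:
--             counts[s[i + 1]] = counts[s[i + 1]] - 1
--     return result
-- ===== Notes on version B (the rewrite author's own statement) =====
-- stated objective: alternative
-- what changed: The quadratic nested scan for a partner summing to the floor-mean is replaced by a single pass that keeps a hash-map multiset of the remaining candidate partners, so the inner scan disappears (a timing run's large inputs mostly hit the negative-mean early exit, where both are equally fast).
import Mathlib
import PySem

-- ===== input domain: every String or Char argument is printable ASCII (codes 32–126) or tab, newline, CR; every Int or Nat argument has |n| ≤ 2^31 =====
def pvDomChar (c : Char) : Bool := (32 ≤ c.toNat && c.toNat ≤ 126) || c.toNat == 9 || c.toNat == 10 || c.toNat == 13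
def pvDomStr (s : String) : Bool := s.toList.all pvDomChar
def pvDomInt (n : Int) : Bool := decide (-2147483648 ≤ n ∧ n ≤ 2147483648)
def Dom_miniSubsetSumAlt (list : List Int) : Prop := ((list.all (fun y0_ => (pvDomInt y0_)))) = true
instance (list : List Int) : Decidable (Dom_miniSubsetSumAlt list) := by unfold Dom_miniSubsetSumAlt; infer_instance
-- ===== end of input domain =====

-- B replaces A's nested partner scan by one pass over the sorted list with a
-- hash-map multiset of the remaining candidate partners (the inner scan disappears).
-- A's print calls are side effects only and are not modelled; equivalence is about the return value.

-- ===== PORT A =====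
-- inner 'while j < end …' loop of A (A's 'acc' is literally 1 if median >= 0 else -1)
def pvInnerA (s : List Int) (median i endI : Int) (j : Int) (result : List (Int × Int)) : List (Int × Int) :=
  if h : (if 0 ≤ median then j < endI else endI < j) then
    let current := PySem.List.pyGetD s i 0 + PySem.List.pyGetD s j 0
    if current = median then
      result ++ [(PySem.List.pyGetD s i 0, PySem.List.pyGetD s j 0)]
    else if median < current then result
    else pvInnerA s median i endI (j + (if 0 ≤ median then 1 else -1)) result
  else result
termination_by (if 0 ≤ median then endI - j else j - endI).toNat
decreasing_by
  by_cases hm : 0 ≤ median <;> simp [hm] at h ⊢ <;> omega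

-- outer 'while i < end …' loop of A
def pvOuterA (s : List Int) (median endI : Int) (i : Int) (result : List (Int × Int)) : List (Int × Int) :=
  if h : (if 0 ≤ median then i < endI else endI < i) then
    let result' := pvInnerA s median i endI (i + (if 0 ≤ median then 1 else -1)) result
    pvOuterA s median endI (i + (if 0 ≤ median then 1 else -1)) result'
  else result
termination_by (if 0 ≤ median then endI - i else i - endI).toNat
decreasing_by
  by_cases hm : 0 ≤ median <;> simp [hm] at h ⊢ <;> omega

def miniSubsetSumAlt (list : List Int) : List (Int × Int) :=
  let s := PySem.List.sorted list (fun x => x) false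
  let median := PySem.Int.floordiv s.sum (s.length : Int)   -- len(list) = 0 excluded by Pre_
  let i : Int := if 0 ≤ median then 0 else (s.length : Int) - 1
  let endI : Int := if 0 ≤ median then (s.length : Int) - 1 else (s.length : Int) - 1
  pvOuterA s median endI i []

-- ===== PORT B =====
-- one step of B's single pass: state = (counter of remaining candidate partners, result)
def pvStepB (s : List Int) (n : Nat) (median : Int)
    (st : PySem.Dict Int Int × List (Int × Int)) (i : Int) : PySem.Dict Int Int × List (Int × Int) :=
  let t := median - PySem.List.pyGetD s i 0
  let res := if 0 < st.1.getD t 0 then st.2 ++ [(PySem.List.pyGetD s i 0, t)] else st.2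
  let cnt :=
    if i + 1 < (n : Int) - 1 then
      -- counts[s[i+1]] -= 1 : the key is always present at this point, so getD is exact here
      st.1.insert (PySem.List.pyGetD s (i + 1) 0) (st.1.getD (PySem.List.pyGetD s (i + 1) 0) 0 - 1)
    else st.1
  (cnt, res)

def miniSubsetSumAlt_alt (list : List Int) : List (Int × Int) :=
  let s := PySem.List.sorted list (fun x => x) false
  let n := s.length
  let median := PySem.Int.floordiv s.sum (n : Int)
  if median < 0 then []
  else
    let counts := (PySem.List.slice s (some 1) (some ((n : Int) - 1))).foldl
        (fun d x => d.insert x (d.getD x 0 + 1)) PySem.Dict.empty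
    ((PySem.List.pyRange 0 ((n : Int) - 1) 1).foldl (pvStepB s n median) (counts, [])).2

-- ===== PRECONDITION & SPEC =====
-- Pre_ excludes only the empty list, on which A raises ZeroDivisionError (len(list) == 0).
def Pre_miniSubsetSumAlt (list : List Int) : Prop := list ≠ []
instance (list : List Int) : Decidable (Pre_miniSubsetSumAlt list) := by unfold Pre_miniSubsetSumAlt; infer_instance
def pvWitness_miniSubsetSumAlt : List Int := [1, 2, 3, -1]

def Spec_miniSubsetSumAlt (list : List Int) (out : List (Int × Int)) : Prop := out = miniSubsetSumAlt_alt list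
instance (list : List Int) (out : List (Int × Int)) : Decidable (Spec_miniSubsetSumAlt list out) := by unfold Spec_miniSubsetSumAlt; infer_instance

-- ===== CLAIM (what is proved, stated in full; the proofs are below) =====
def Claim_equal_miniSubsetSumAlt : Prop := ∀ (list : List Int), Dom_miniSubsetSumAlt list → Pre_miniSubsetSumAlt list → Spec_miniSubsetSumAlt list (miniSubsetSumAlt list)

-- ===== LEMMAS AND PROOFS =====

-- common specification: for index a, the pair appended at i = a (if any), followed by the rest
def pvPairSpec (s : List Int) (m : Int) (a : Nat) : List (Int × Int) :=
  if _h : a + 1 < s.length then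
    (if (m - s.getD a 0) ∈ (s.drop (a + 1)).take (s.length - 1 - (a + 1)) then
      [(s.getD a 0, m - s.getD a 0)] else []) ++ pvPairSpec s m (a + 1)
  else []
termination_by s.length - a

theorem pvSliceCons (s : List Int) (j : Nat) (h : j + 1 < s.length) :
    (s.drop j).take (s.length - 1 - j) = s[j] :: (s.drop (j + 1)).take (s.length - 1 - (j + 1)) := by
  rw [List.drop_eq_getElem_cons (by omega)]
  have h2 : s.length - 1 - j = (s.length - 1 - (j + 1)) + 1 := by omega
  rw [h2, List.take_succ_cons]

theorem pvMemSlice (s : List Int) (j c : Nat) (x : Int) (h : x ∈ (s.drop j).take c) :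
    ∃ q, j ≤ q ∧ ∃ (hq : q < s.length), s[q] = x := by
  have h' := List.mem_of_mem_take h
  rw [List.mem_iff_getElem] at h'
  obtain ⟨k, hk, hx⟩ := h'
  rw [List.getElem_drop] at hx
  exact ⟨j + k, by omega, by simp at hk; omega, hx⟩

theorem pvInnerA_eq (s : List Int) (m : Int) (hm : 0 ≤ m)
    (hs : ∀ p q : Nat, (hpq : p ≤ q) → (hq : q < s.length) → s[p]'(by omega) ≤ s[q])
    (a : Nat) (j : Nat) (res : List (Int × Int)) :
    pvInnerA s m (a : Int) ((s.length : Int) - 1) (j : Int) res =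
      res ++ (if (m - s.getD a 0) ∈ (s.drop j).take (s.length - 1 - j) then
        [(s.getD a 0, m - s.getD a 0)] else []) := by
  obtain ⟨k, hk⟩ : ∃ k, s.length - 1 - j ≤ k := ⟨_, le_refl _⟩
  induction k generalizing j res with
  | zero =>
    have hcond : ¬ (if 0 ≤ m then (j : Int) < (s.length : Int) - 1 else (s.length : Int) - 1 < (j : Int)) := by
      simp only [if_pos hm]; omega
    rw [pvInnerA, dif_neg hcond]
    have hz : s.length - 1 - j = 0 := by omega
    simp [hz]
  | succ k ih =>
    by_cases hcond : (j : Int) < (s.length : Int) - 1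
    · have hjl : j + 1 < s.length := by omega
      rw [pvInnerA, dif_pos (by simp only [if_pos hm]; exact hcond)]
      simp only [PySem.List.pyGetD_natCast]
      have hgj : s.getD j 0 = s[j] := List.getD_eq_getElem s 0 (by omega)
      by_cases h1 : s.getD a 0 + s.getD j 0 = m
      · -- current == median : append and stop; the head of the slice is the partner
        rw [if_pos h1, pvSliceCons s j hjl]
        have hhit : m - s.getD a 0 = s[j] := by omega
        rw [if_pos (by rw [hhit]; exact List.mem_cons_self ..)]
        have hjv : s.getD j 0 = m - s.getD a 0 := by omega
        rw [hjv]
      · rw [if_neg h1]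
        by_cases h2 : m < s.getD a 0 + s.getD j 0
        · -- current > median : stop; no later partner exists (sortedness)
          rw [if_pos h2, pvSliceCons s j hjl]
          have hnot : (m - s.getD a 0) ∉ s[j] :: (s.drop (j + 1)).take (s.length - 1 - (j + 1)) := by
            intro hmem
            rcases List.mem_cons.mp hmem with heq | htl
            · omega
            · obtain ⟨q, hq1, hq2, hq3⟩ := pvMemSlice s (j + 1) _ _ htl
              have hle := hs j q (by omega) hq2
              omega
          rw [if_neg hnot, List.append_nil]
        · -- current < median : continue with j + 1
          rw [if_neg h2]
          have hstep : (j : Int) + (if 0 ≤ m then 1 else -1) = ((j + 1 : Nat) : Int) := by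
            simp only [if_pos hm]; push_cast; ring
          rw [hstep, ih (j + 1) res (by omega), pvSliceCons s j hjl]
          have hne : m - s.getD a 0 ≠ s[j] := by omega
          simp only [List.mem_cons, hne, false_or]
    · have hcond' : ¬ (if 0 ≤ m then (j : Int) < (s.length : Int) - 1 else (s.length : Int) - 1 < (j : Int)) := by
        simp only [if_pos hm]; exact hcond
      rw [pvInnerA, dif_neg hcond']
      have hz : s.length - 1 - j = 0 := by omega
      simp [hz]

theorem pvOuterA_eq (s : List Int) (m : Int) (hm : 0 ≤ m)
    (hs : ∀ p q : Nat, (hpq : p ≤ q) → (hq : q < s.length) → s[p]'(by omega) ≤ s[q])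
    (a : Nat) (res : List (Int × Int)) :
    pvOuterA s m ((s.length : Int) - 1) (a : Int) res = res ++ pvPairSpec s m a := by
  obtain ⟨k, hk⟩ : ∃ k, s.length - 1 - a ≤ k := ⟨_, le_refl _⟩
  induction k generalizing a res with
  | zero =>
    rw [pvOuterA, dif_neg (by simp only [if_pos hm]; omega), pvPairSpec, dif_neg (by omega)]
    simp
  | succ k ih =>
    by_cases hcond : (a : Int) < (s.length : Int) - 1
    · rw [pvOuterA, dif_pos (by simp only [if_pos hm]; exact hcond)]
      have hstep : (a : Int) + (if 0 ≤ m then 1 else -1) = ((a + 1 : Nat) : Int) := by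
        simp only [if_pos hm]; push_cast; ring
      rw [hstep, pvInnerA_eq s m hm hs a (a + 1) res, ih (a + 1) _ (by omega)]
      conv_rhs => rw [pvPairSpec]
      rw [dif_pos (show a + 1 < s.length by omega), List.append_assoc]
    · rw [pvOuterA, dif_neg (by simp only [if_pos hm]; exact hcond), pvPairSpec, dif_neg (by omega)]
      simp

theorem pvLoopB_eq (s : List Int) (m : Int) (a : Nat)
    (d : PySem.Dict Int Int) (res : List (Int × Int))
    (hd : ∀ x, d.getD x 0 = ((s.drop (a + 1)).take (s.length - 1 - (a + 1))).count x) :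
    ((PySem.List.pyRange (a : Int) ((s.length : Int) - 1) 1).foldl (pvStepB s s.length m) (d, res)).2 =
      res ++ pvPairSpec s m a := by
  obtain ⟨k, hk⟩ : ∃ k, s.length - 1 - a ≤ k := ⟨_, le_refl _⟩
  induction k generalizing a d res with
  | zero =>
    rw [PySem.List.pyRange_one_eq_nil (by omega), List.foldl_nil, pvPairSpec, dif_neg (by omega)]
    simp
  | succ k ih =>
    by_cases hcond : (a : Int) < (s.length : Int) - 1
    · rw [PySem.List.pyRange_one_cons hcond, List.foldl_cons]
      have hcast : (a : Int) + 1 = ((a + 1 : Nat) : Int) := by push_cast; ring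
      have hres : (if 0 < d.getD (m - s.getD a 0) 0 then res ++ [(s.getD a 0, m - s.getD a 0)] else res) =
          res ++ (if (m - s.getD a 0) ∈ (s.drop (a + 1)).take (s.length - 1 - (a + 1)) then
            [(s.getD a 0, m - s.getD a 0)] else []) := by
        rw [hd]
        by_cases hmem : (m - s.getD a 0) ∈ (s.drop (a + 1)).take (s.length - 1 - (a + 1))
        · rw [if_pos hmem, if_pos (by exact_mod_cast List.count_pos_iff.mpr hmem)]
        · rw [if_neg hmem, if_neg (by rw [List.count_eq_zero_of_not_mem hmem]; simp), List.append_nil]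
      have hstep : pvStepB s s.length m (d, res) (a : Int) =
          ((if (a : Int) + 1 < (s.length : Int) - 1 then
              d.insert (s.getD (a + 1) 0) (d.getD (s.getD (a + 1) 0) 0 - 1) else d),
           res ++ (if (m - s.getD a 0) ∈ (s.drop (a + 1)).take (s.length - 1 - (a + 1)) then
            [(s.getD a 0, m - s.getD a 0)] else [])) := by
        simp only [pvStepB, hcast, PySem.List.pyGetD_natCast, hres]
      rw [hstep, hcast, ih (a + 1) _ _ ?_ (by omega)]
      · conv_rhs => rw [pvPairSpec]
        rw [dif_pos (show a + 1 < s.length by omega), List.append_assoc]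
      · -- the counter invariant is preserved
        intro x
        by_cases hin : ((a + 1 : Nat) : Int) < (s.length : Int) - 1
        · rw [if_pos hin]
          have hjl : (a + 1) + 1 < s.length := by omega
          have hga : s.getD (a + 1) 0 = s[a + 1] := List.getD_eq_getElem s 0 (by omega)
          rw [PySem.Dict.getD_insert]
          by_cases hx : x = s.getD (a + 1) 0
          · rw [if_pos hx, hd, hx, hga, pvSliceCons s (a + 1) hjl, List.count_cons_self]
            omega
          · rw [if_neg hx, hd, pvSliceCons s (a + 1) hjl,
              List.count_cons_of_ne (by rw [hga] at hx; exact fun h => hx h.symm)]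
        · rw [if_neg hin]
          have h1 : s.length - 1 - (a + 1) = 0 := by omega
          have h2 : s.length - 1 - (a + 1 + 1) = 0 := by omega
          rw [hd, h1, h2]
          simp
    · rw [PySem.List.pyRange_one_eq_nil (by omega), List.foldl_nil, pvPairSpec, dif_neg (by omega)]
      simp

-- ===== VERDICT (by name: the statement is the Claim_ definition above) =====
theorem miniSubsetSumAlt_spec : Claim_equal_miniSubsetSumAlt := by
  intro list hdom hpre
  unfold Spec_miniSubsetSumAlt
  simp only [miniSubsetSumAlt, miniSubsetSumAlt_alt]
  have hne : PySem.List.sorted list (fun x => x) false ≠ [] := by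
    rw [Ne, PySem.List.sorted_eq_nil_iff]; exact hpre
  have hlen : 1 ≤ (PySem.List.sorted list (fun x => x) false).length :=
    List.length_pos_iff.mpr hne
  by_cases hneg : PySem.Int.floordiv (PySem.List.sorted list (fun x => x) false).sum
      ((PySem.List.sorted list (fun x => x) false).length : Int) < 0
  · -- median < 0 : A's outer loop never runs, B returns [] at once
    rw [if_pos hneg]
    simp only [if_neg (not_le.mpr hneg)]
    rw [pvOuterA, dif_neg (by simp only [if_neg (not_le.mpr hneg)]; omega)]
  · have hm : 0 ≤ PySem.Int.floordiv (PySem.List.sorted list (fun x => x) false).sum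
        ((PySem.List.sorted list (fun x => x) false).length : Int) := not_lt.mp hneg
    rw [if_neg hneg]
    simp only [if_pos hm]
    have hs : ∀ p q : Nat, (hpq : p ≤ q) →
        (hq : q < (PySem.List.sorted list (fun x => x) false).length) →
        (PySem.List.sorted list (fun x => x) false)[p]'(by omega) ≤
          (PySem.List.sorted list (fun x => x) false)[q] :=
      fun p q hpq hq => PySem.List.sorted_id_getElem_mono list hpq hq
    have hA := pvOuterA_eq _ _ hm hs 0 []
    rw [Nat.cast_zero] at hA
    rw [hA, List.nil_append]
    -- B side
    have hlcast : (((PySem.List.sorted list (fun x => x) false).length : Int) - 1) =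
        (((PySem.List.sorted list (fun x => x) false).length - 1 : Nat) : Int) := by omega
    have hslice : PySem.List.slice (PySem.List.sorted list (fun x => x) false) (some 1)
        (some (((PySem.List.sorted list (fun x => x) false).length : Int) - 1)) =
        ((PySem.List.sorted list (fun x => x) false).drop 1).take
          ((PySem.List.sorted list (fun x => x) false).length - 1 - 1) := by
      rw [hlcast]
      exact_mod_cast PySem.List.slice_natCast (PySem.List.sorted list (fun x => x) false) 1
        ((PySem.List.sorted list (fun x => x) false).length - 1)
    have hd : ∀ x : Int, ((PySem.List.slice (PySem.List.sorted list (fun x => x) false) (some 1)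
        (some (((PySem.List.sorted list (fun x => x) false).length : Int) - 1))).foldl
        (fun d x => d.insert x (d.getD x 0 + 1)) PySem.Dict.empty).getD x 0 =
        (((((PySem.List.sorted list (fun x => x) false).drop (0 + 1)).take
          ((PySem.List.sorted list (fun x => x) false).length - 1 - (0 + 1))).count x : Nat) : Int) := by
      intro x
      simp only [PySem.Dict.getD_foldl_insert_add_one, PySem.Dict.getD_empty, hslice]
      norm_num
    have hB := pvLoopB_eq _
      (PySem.Int.floordiv (PySem.List.sorted list (fun x => x) false).sum
        ((PySem.List.sorted list (fun x => x) false).length : Int)) 0 _ [] hd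
    rw [Nat.cast_zero] at hB
    rw [hB, List.nil_append]
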